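-- pv_equiv track=rewrite | github.com/yatin-bhojwani/TheDriveFinal | graphrag/api/app/rag.py | preserve_conversation_scope
-- ===== SOURCE A (Python) =====
-- from typing import List, Dict, Optional, Tuple
--
-- def preserve_conversation_scope(conversation_history: List[Dict]) -> Tuple[str, Optional[str], Optional[str]]:
--     """
--     Extract scope information from conversation history to maintain context.
--     Returns (scope, file_id, folder_id) from the most relevant previous interaction.
--     """
--     if not conversation_history:
--         return "drive", None, None
--
--     # Look for the most recent interaction with specific scope
--     for turn in reversed(conversation_history):
--         scope = turn.get("scope", "drive")
--         file_id = turn.get("file_id")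
--         folder_id = turn.get("folder_id")
--
--         # Prefer file-specific scope over folder or drive
--         if scope == "file" and file_id:
--             return scope, file_id, folder_id
--         elif scope == "folder" and folder_id:
--             return scope, file_id, folder_id
--
--     # Fallback to drive scope
--     return "drive", None, None
-- ===== SOURCE B (Python) =====
-- def preserve_conversation_scope(conversation_history):
--     best = None
--     for turn in conversation_history:
--         scope = turn.get("scope", "drive")
--         file_id = turn.get("file_id")
--         folder_id = turn.get("folder_id")
--         if (scope == "file" and file_id) or (scope == "folder" and folder_id):
--             best = (scope, file_id, folder_id)
--     return best if best is not None else ("drive", None, None)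
-- ===== Notes on version B (the rewrite author's own statement) =====
-- stated objective: simpler
-- what changed: Replaces the reverse-then-scan-with-early-return by a single forward pass that keeps the last matching turn in an accumulator and falls back to ('drive', None, None).
import Mathlib
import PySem

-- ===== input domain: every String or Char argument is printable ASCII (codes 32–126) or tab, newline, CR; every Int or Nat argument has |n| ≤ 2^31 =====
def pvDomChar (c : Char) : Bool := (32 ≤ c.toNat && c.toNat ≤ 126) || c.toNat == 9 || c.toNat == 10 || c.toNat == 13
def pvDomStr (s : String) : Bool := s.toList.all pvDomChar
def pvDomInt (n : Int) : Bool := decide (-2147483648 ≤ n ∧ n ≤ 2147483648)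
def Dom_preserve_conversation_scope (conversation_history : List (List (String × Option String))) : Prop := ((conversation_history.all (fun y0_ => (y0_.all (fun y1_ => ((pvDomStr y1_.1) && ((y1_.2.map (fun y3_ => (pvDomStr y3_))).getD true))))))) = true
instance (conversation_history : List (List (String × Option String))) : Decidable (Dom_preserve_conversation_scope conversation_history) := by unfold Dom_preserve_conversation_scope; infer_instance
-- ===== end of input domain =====

-- B replaces A's reverse-scan-with-early-return by one forward pass keeping the last
-- matching turn in an accumulator (objective: simpler).

-- Python truthiness of an Optional[str]: None and "" are falsy (shared primitive).
def pvTruthyOptStr (o : Option String) : Bool :=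
  match o with
  | some s => !(s == "")
  | none => false

-- ===== PORT A =====
-- the 'for turn in reversed(...)' loop with early return, as recursion on the reversed list
def preserve_conversation_scope_loop : List (List (String × Option String)) → String × Option String × Option String
  | [] => ("drive", none, none)
  | turn :: rest =>
    let d := PySem.Dict.ofList turn
    let scope := (d.get? "scope").getD (some "drive")
    let file_id := (d.get? "file_id").getD none
    let folder_id := (d.get? "folder_id").getD none
    if scope == some "file" && pvTruthyOptStr file_id then (scope.getD "drive", file_id, folder_id)
    else if scope == some "folder" && pvTruthyOptStr folder_id then (scope.getD "drive", file_id, folder_id)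
    else preserve_conversation_scope_loop rest

def preserve_conversation_scope (conversation_history : List (List (String × Option String))) : String × Option String × Option String :=
  if conversation_history.isEmpty then ("drive", none, none)
  else preserve_conversation_scope_loop conversation_history.reverse

-- ===== PORT B =====
def preserve_conversation_scope_alt (conversation_history : List (List (String × Option String))) : String × Option String × Option String :=
  (conversation_history.foldl (fun best turn =>
      let d := PySem.Dict.ofList turn
      let scope := (d.get? "scope").getD (some "drive")
      let file_id := (d.get? "file_id").getD none
      let folder_id := (d.get? "folder_id").getD none
      if (scope == some "file" && pvTruthyOptStr file_id) || (scope == some "folder" && pvTruthyOptStr folder_id)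
      then some (scope.getD "drive", file_id, folder_id)
      else best) none).getD ("drive", none, none)

-- ===== PRECONDITION & SPEC =====
def Spec_preserve_conversation_scope (conversation_history : List (List (String × Option String))) (out : String × Option String × Option String) : Prop := out = preserve_conversation_scope_alt conversation_history
instance (conversation_history : List (List (String × Option String))) (out : String × Option String × Option String) : Decidable (Spec_preserve_conversation_scope conversation_history out) := by unfold Spec_preserve_conversation_scope; infer_instance

-- ===== CLAIM (what is proved, stated in full; the proofs are below) =====
def Claim_equal_preserve_conversation_scope : Prop := ∀ (conversation_history : List (List (String × Option String))), Dom_preserve_conversation_scope conversation_history → Spec_preserve_conversation_scope conversation_history (preserve_conversation_scope conversation_history)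

-- ===== LEMMAS AND PROOFS =====

-- named pieces of the per-turn computation (proof-only abbreviations)
def pvScope (turn : List (String × Option String)) : Option String :=
  ((PySem.Dict.ofList turn).get? "scope").getD (some "drive")
def pvFile (turn : List (String × Option String)) : Option String :=
  ((PySem.Dict.ofList turn).get? "file_id").getD none
def pvFolder (turn : List (String × Option String)) : Option String :=
  ((PySem.Dict.ofList turn).get? "folder_id").getD none
def pvC1 (turn : List (String × Option String)) : Bool :=
  pvScope turn == some "file" && pvTruthyOptStr (pvFile turn)
def pvC2 (turn : List (String × Option String)) : Bool :=
  pvScope turn == some "folder" && pvTruthyOptStr (pvFolder turn)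
def pvVal (turn : List (String × Option String)) : String × Option String × Option String :=
  ((pvScope turn).getD "drive", pvFile turn, pvFolder turn)

-- the result a single turn contributes, if any
def pvPick? (turn : List (String × Option String)) : Option (String × Option String × Option String) :=
  if pvC1 turn || pvC2 turn then some (pvVal turn) else none

theorem loop_cons (turn : List (String × Option String)) (rest : List (List (String × Option String))) :
    preserve_conversation_scope_loop (turn :: rest)
      = if pvC1 turn || pvC2 turn then pvVal turn else preserve_conversation_scope_loop rest := by
  cases h1 : pvC1 turn <;> cases h2 : pvC2 turn <;>
    simp only [pvC1, pvC2, pvScope, pvFile, pvFolder] at h1 h2 <;>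
    simp [preserve_conversation_scope_loop, pvVal, pvScope, pvFile, pvFolder, h1, h2]

theorem loopA_eq_findSome (l : List (List (String × Option String))) :
    preserve_conversation_scope_loop l = (l.findSome? pvPick?).getD ("drive", none, none) := by
  induction l with
  | nil => rfl
  | cons turn rest ih =>
    rw [loop_cons, List.findSome?_cons]
    cases h : pvC1 turn || pvC2 turn <;> simp [pvPick?, h, ih]

theorem foldB_eq_findSome (l : List (List (String × Option String)))
    (acc : Option (String × Option String × Option String)) :
    l.foldl (fun best turn =>
      let d := PySem.Dict.ofList turn
      let scope := (d.get? "scope").getD (some "drive")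
      let file_id := (d.get? "file_id").getD none
      let folder_id := (d.get? "folder_id").getD none
      if (scope == some "file" && pvTruthyOptStr file_id) || (scope == some "folder" && pvTruthyOptStr folder_id)
      then some (scope.getD "drive", file_id, folder_id)
      else best) acc
    = ((l.reverse.findSome? pvPick?).elim acc some) := by
  induction l generalizing acc with
  | nil => rfl
  | cons turn rest ih =>
    simp only [List.foldl_cons, ih, List.reverse_cons, List.findSome?_append]
    cases h : rest.reverse.findSome? pvPick? with
    | some r => simp
    | none =>
      show (if pvC1 turn || pvC2 turn then some (pvVal turn) else acc) = _
      simp only [List.findSome?_cons, List.findSome?_nil]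
      unfold pvPick?
      cases h2 : pvC1 turn || pvC2 turn <;> simp [Option.elim]

theorem A_eq_findSome (h : List (List (String × Option String))) :
    preserve_conversation_scope h = (h.reverse.findSome? pvPick?).getD ("drive", none, none) := by
  cases h with
  | nil => rfl
  | cons t rest =>
    simp only [preserve_conversation_scope, List.isEmpty_cons, if_neg Bool.false_ne_true]
    exact loopA_eq_findSome _

-- ===== VERDICT (by name: the statement is the Claim_ definition above) =====
theorem preserve_conversation_scope_spec : Claim_equal_preserve_conversation_scope := by
  intro h _
  unfold Spec_preserve_conversation_scope preserve_conversation_scope_alt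
  rw [foldB_eq_findSome, A_eq_findSome]
  cases (List.findSome? pvPick? h.reverse) <;> rfl
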